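-- pv_equiv track=rewrite | github.com/yum-food/2ner | BakeVertexData.py | get_submesh_of_island
-- ===== SOURCE A (Python) =====
-- def get_submesh_of_island(island_vert_indices, submeshes):
--     """Find which submesh an island belongs to"""
--     # island_vert_indices is already a set of indices
--
--     # Find submesh with most overlap
--     best_submesh = None
--     best_overlap = 0
--
--     for i, submesh in enumerate(submeshes):
--         overlap = len(island_vert_indices & submesh)
--         if overlap > best_overlap:
--             best_overlap = overlap
--             best_submesh = i
--
--     return best_submesh
-- ===== SOURCE B (Python) =====
-- def get_submesh_of_island(island_vert_indices, submeshes):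
--     """Find which submesh an island belongs to"""
--     # Inverted index: vertex -> list of submesh indices whose set contains it
--     index = {}
--     for i, submesh in enumerate(submeshes):
--         for v in submesh:
--             index.setdefault(v, []).append(i)
--     # Per-submesh overlap counts, by a single scan over the island
--     counts = {}
--     for v in island_vert_indices:
--         for i in index.get(v, []):
--             counts[i] = counts.get(i, 0) + 1
--     # Earliest submesh index with strictly greater positive overlap
--     best_submesh = None
--     best_overlap = 0
--     for i in range(len(submeshes)):
--         c = counts.get(i, 0)
--         if c > best_overlap:
--             best_overlap = c
--             best_submesh = i
--     return best_submesh
-- ===== Notes on version B (the rewrite author's own statement) =====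
-- stated objective: alternative
-- what changed: Replaces the per-submesh set-intersection loop by an inverted index (vertex -> submesh indices) built once, a single counting scan over the island, and a final argmax scan over the counts, keeping the earliest-strictly-greater tie-break and None on zero overlap.
import Mathlib
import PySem

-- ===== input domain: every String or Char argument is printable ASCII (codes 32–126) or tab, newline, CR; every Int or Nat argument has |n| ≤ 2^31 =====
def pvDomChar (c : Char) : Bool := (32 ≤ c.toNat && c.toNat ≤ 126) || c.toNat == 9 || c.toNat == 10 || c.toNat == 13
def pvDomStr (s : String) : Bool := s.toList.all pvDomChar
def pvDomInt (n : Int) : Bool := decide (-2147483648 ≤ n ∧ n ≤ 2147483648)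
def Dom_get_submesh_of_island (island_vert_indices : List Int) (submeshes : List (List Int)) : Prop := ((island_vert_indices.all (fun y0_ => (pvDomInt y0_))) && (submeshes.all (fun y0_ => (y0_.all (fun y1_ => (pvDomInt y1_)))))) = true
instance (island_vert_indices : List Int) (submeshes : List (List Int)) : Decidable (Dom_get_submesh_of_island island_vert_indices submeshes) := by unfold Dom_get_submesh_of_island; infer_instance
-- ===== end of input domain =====

-- B replaces A's per-submesh set-intersection loop by an inverted index (vertex -> submesh indices) plus one
-- counting scan over the island, keeping the earliest-strict-improvement tie-break (objective: alternative).

-- ===== PORT A =====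
def get_submesh_of_island (island_vert_indices : List Int) (submeshes : List (List Int)) : Option Int :=
  (List.foldl
    (fun (st : Option Int × Int) (p : Int × List Int) =>
      let overlap : Int := ((PySem.Set.inter island_vert_indices p.2).length : Int)
      if overlap > st.2 then (some p.1, overlap) else st)
    (none, 0) (PySem.List.enumerate submeshes)).1

-- ===== PORT B =====
def get_submesh_of_island_alt (island_vert_indices : List Int) (submeshes : List (List Int)) : Option Int :=
  let index : PySem.Dict Int (List Int) :=
    List.foldl (fun d p => List.foldl (fun d v => d.modify v [] (fun l => l ++ [p.1])) d p.2)
      PySem.Dict.empty (PySem.List.enumerate submeshes)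
  let counts : PySem.Dict Int Int :=
    List.foldl (fun d v => List.foldl (fun d i => d.modify i 0 (fun c => c + 1)) d (index.getD v []))
      PySem.Dict.empty island_vert_indices
  (List.foldl
    (fun (st : Option Int × Int) (i : Int) =>
      let c := counts.getD i 0
      if c > st.2 then (some i, c) else st)
    (none, 0) (PySem.List.pyRange 0 (submeshes.length : Int))).1

-- ===== PRECONDITION & SPEC =====
-- Both Python arguments are sets; Pre_ is the set-representation invariant of the list encoding: each submesh
-- list holds distinct elements (a list with a duplicated vertex does not encode a Python set — A's intersection
-- cardinality would count it once while B counts occurrences, so such non-set lists are excluded).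
def Pre_get_submesh_of_island (island_vert_indices : List Int) (submeshes : List (List Int)) : Prop :=
  ∀ sm ∈ submeshes, sm.Nodup
instance (island_vert_indices : List Int) (submeshes : List (List Int)) : Decidable (Pre_get_submesh_of_island island_vert_indices submeshes) := by unfold Pre_get_submesh_of_island; infer_instance
def pvWitness_get_submesh_of_island : List Int × List (List Int) := ([1, 2], [[3], [1, 2]])

def Spec_get_submesh_of_island (island_vert_indices : List Int) (submeshes : List (List Int)) (out : Option Int) : Prop := out = get_submesh_of_island_alt island_vert_indices submeshes
instance (island_vert_indices : List Int) (submeshes : List (List Int)) (out : Option Int) : Decidable (Spec_get_submesh_of_island island_vert_indices submeshes out) := by unfold Spec_get_submesh_of_island; infer_instance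

-- ===== CLAIM (what is proved, stated in full; the proofs are below) =====
def Claim_equal_get_submesh_of_island : Prop := ∀ (island_vert_indices : List Int) (submeshes : List (List Int)), Dom_get_submesh_of_island island_vert_indices submeshes → Pre_get_submesh_of_island island_vert_indices submeshes → Spec_get_submesh_of_island island_vert_indices submeshes (get_submesh_of_island island_vert_indices submeshes)

-- ===== LEMMAS AND PROOFS =====

-- B's inverted index and counter, named for the proofs (definitionally the `let`s of the alt port)
def pvIndex (submeshes : List (List Int)) : PySem.Dict Int (List Int) :=
  List.foldl (fun d p => List.foldl (fun d v => d.modify v [] (fun l => l ++ [p.1])) d p.2)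
    PySem.Dict.empty (PySem.List.enumerate submeshes)

def pvCounts (island_vert_indices : List Int) (submeshes : List (List Int)) : PySem.Dict Int Int :=
  List.foldl (fun d v => List.foldl (fun d i => d.modify i 0 (fun c => c + 1)) d ((pvIndex submeshes).getD v []))
    PySem.Dict.empty island_vert_indices

-- the flattened (vertex, submesh-index) pair list behind the inverted index
def pvPairs (submeshes : List (List Int)) : List (Int × Int) :=
  (PySem.List.enumerate submeshes).flatMap (fun p => p.2.map (fun w => (w, p.1)))

-- the shared argmax step both final scans perform on (index, overlap) pairs
def pvStep (st : Option Int × Int) (q : Int × Int) : Option Int × Int :=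
  if q.2 > st.2 then (some q.1, q.2) else st

lemma enum_eq_map_range {α : Type} (d : α) (l : List α) (k : Int) :
    PySem.List.enumerate l k = (List.range l.length).map (fun (j : Nat) => (k + (j : Int), l.getD j d)) := by
  induction l generalizing k with
  | nil => simp [PySem.List.enumerate]
  | cons x t ih =>
    rw [PySem.List.enumerate, ih (k + 1)]
    simp [List.range_succ_eq_map, List.map_map, Function.comp]
    intro a _; omega

lemma pvIndex_getD (submeshes : List (List Int)) (v : Int) :
    (pvIndex submeshes).getD v [] = ((pvPairs submeshes).filter (fun p => p.1 == v)).map (·.2) := by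
  have h : pvIndex submeshes =
      List.foldl (fun d (p : Int × Int) => d.modify p.1 [] (fun l => l ++ [p.2])) PySem.Dict.empty (pvPairs submeshes) := by
    unfold pvIndex pvPairs
    rw [List.foldl_flatMap]
    simp only [List.foldl_map]
  rw [h, PySem.Dict.getD_foldl_modify_append]
  simp

lemma pvCounts_getD (island_vert_indices : List Int) (submeshes : List (List Int)) (i : Int) :
    (pvCounts island_vert_indices submeshes).getD i 0 =
      ((island_vert_indices.flatMap (fun v => (pvIndex submeshes).getD v [])).count i : Int) := by
  unfold pvCounts
  rw [← List.foldl_flatMap, PySem.Dict.getD_foldl_modify_add_one]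
  simp

lemma sum_range_ite (n j : Nat) (f : Nat → Nat) (h : j < n) :
    ((List.range n).map (fun i => if i = j then f i else 0)).sum = f j := by
  induction n with
  | zero => omega
  | succ n ih =>
    rw [List.range_succ, List.map_append, List.sum_append]
    by_cases hj : j = n
    · subst hj
      have hz : ((List.range j).map (fun i => if i = j then f i else 0)).sum = 0 := by
        apply List.sum_eq_zero; intro x hx
        simp only [List.mem_map, List.mem_range] at hx
        obtain ⟨i, hi, rfl⟩ := hx
        simp [Nat.ne_of_lt hi]
      simp [hz]
    · rw [ih (by omega)]; simp; omega

lemma count_pvIndex (submeshes : List (List Int)) (v : Int) (j : Nat) (hj : j < submeshes.length) :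
    ((pvIndex submeshes).getD v []).count (j : Int) = (submeshes.getD j []).count v := by
  rw [pvIndex_getD, List.count_eq_countP, List.countP_map, List.countP_filter]
  unfold pvPairs
  rw [List.countP_flatMap, enum_eq_map_range [] submeshes 0, List.map_map]
  simp only [Function.comp_def]
  have hc := List.map_congr_left (l := List.range submeshes.length)
    (f := fun (j' : Nat) => List.countP (fun x : Int × Int => x.2 == (j : Int) && x.1 == v)
            (List.map (fun w => (w, (0 : Int) + (j' : Int))) (submeshes.getD j' [])))
    (g := fun (j' : Nat) => if j' = j then (submeshes.getD j' []).count v else 0)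
    (by
      intro j' _
      dsimp only
      rw [List.countP_map]
      simp only [Function.comp_def]
      by_cases h : j' = j
      · subst h
        simp [List.count_eq_countP]
      · have hne : ((0 : Int) + (j' : Int) == (j : Int)) = false := by
          simp; omega
        rw [hne]
        simp [h])
  rw [hc, sum_range_ite _ _ _ hj]

lemma pvCounts_eq_overlap (island_vert_indices : List Int) (submeshes : List (List Int))
    (hnd : ∀ sm ∈ submeshes, sm.Nodup) (j : Nat) (hj : j < submeshes.length) :
    (pvCounts island_vert_indices submeshes).getD (j : Int) 0 =
      ((island_vert_indices.filter (fun v => (submeshes.getD j []).contains v)).length : Int) := by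
  rw [pvCounts_getD, List.count_flatMap]
  have hmem : submeshes.getD j [] ∈ submeshes := by
    rw [List.getD_eq_getElem _ _ hj]; exact List.getElem_mem hj
  have hnodup := hnd _ hmem
  have hc : ∀ v ∈ island_vert_indices,
      (List.count (j : Int) ∘ (fun v => (pvIndex submeshes).getD v [])) v =
      (fun v => if (submeshes.getD j []).contains v then 1 else 0) v := by
    intro v _
    dsimp only [Function.comp_apply]
    rw [count_pvIndex _ _ _ hj, hnodup.count]
    simp
  rw [List.map_congr_left hc, PySem.List.sum_map_ite_one_zero_nat, List.countP_eq_length_filter]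

-- ===== VERDICT (by name: the statement is the Claim_ definition above) =====
theorem get_submesh_of_island_spec : Claim_equal_get_submesh_of_island := by
  intro island submeshes _hDom hPre
  unfold Spec_get_submesh_of_island
  show (List.foldl
      (fun st p => pvStep st (p.1, ((PySem.Set.inter island p.2).length : Int)))
      (none, 0) (PySem.List.enumerate submeshes)).1 =
    (List.foldl
      (fun st i => pvStep st (i, (pvCounts island submeshes).getD i 0))
      (none, 0) (PySem.List.pyRange 0 (submeshes.length : Int))).1
  rw [← List.foldl_map (f := fun p : Int × List Int => (p.1, ((PySem.Set.inter island p.2).length : Int))) (g := pvStep),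
      ← List.foldl_map (f := fun i : Int => (i, (pvCounts island submeshes).getD i 0)) (g := pvStep)]
  congr 2
  rw [enum_eq_map_range [] submeshes 0, PySem.List.pyRange_zero_natCast, List.map_map, List.map_map]
  apply List.map_congr_left
  intro j hj
  rw [List.mem_range] at hj
  simp only [Function.comp_def, zero_add]
  refine Prod.ext rfl ?_
  dsimp only
  rw [pvCounts_eq_overlap island submeshes hPre j hj]
  rfl
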